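-- pv_equiv track=rewrite | github.com/graphcore/popart | python/popxl/python_files/replica_grouping.py | _get_strides
-- ===== SOURCE A (Python) =====
-- from typing import TYPE_CHECKING, Iterable, Optional, List, Tuple, Set
--
-- def _get_strides(assignment: List[int]) -> Tuple[Set, List[Tuple[int, int]]]:
--     """Return the set of strides from all groups.
--
--     The stride is the distance between two consecutive replicas of the same group.
--
--     For example if assignment == [0, 0, 1, 1, 0, 0, 1, 1]. The strides for group 0 are
--     [1, 3, 1] and of group 1 are [1, 3, 1]. Therefore the set of strides are [1, 3].
--     """
--     # The result set.
--     strides = set()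
--     # Groups are the unique numbers in assignments.
--     groups = set(assignment)
--
--     for group in groups:
--         # For each group, list the indices of each instance of that group.
--         group_indices = [index for index, g in enumerate(assignment) if g == group]
--         if len(group_indices) > 1:
--             # Work out the distance between the indices.
--             group_strides = [
--                 i - j for i, j in zip(group_indices[1:], group_indices[:-1])
--             ]
--             # Add distances to result.
--             strides.update(group_strides)
--
--     return strides
-- ===== SOURCE B (Python) =====
-- def _get_strides(assignment):
--     # One pass groups the indices by group in a dict, so each group's index
--     # list is built once instead of rescanning the whole assignment per group.
--     indices = {}
--     for index, group in enumerate(assignment):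
--         indices.setdefault(group, []).append(index)
--     strides = set()
--     for idx in indices.values():
--         for i, j in zip(idx[1:], idx[:-1]):
--             strides.add(i - j)
--     return strides
-- ===== Notes on version B (the rewrite author's own statement) =====
-- stated objective: faster
-- what changed: Replaces the per-group rescan of the whole assignment with a single pass that groups indices in a dict keyed by group, then reads the gaps off each index list once.
import Mathlib
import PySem

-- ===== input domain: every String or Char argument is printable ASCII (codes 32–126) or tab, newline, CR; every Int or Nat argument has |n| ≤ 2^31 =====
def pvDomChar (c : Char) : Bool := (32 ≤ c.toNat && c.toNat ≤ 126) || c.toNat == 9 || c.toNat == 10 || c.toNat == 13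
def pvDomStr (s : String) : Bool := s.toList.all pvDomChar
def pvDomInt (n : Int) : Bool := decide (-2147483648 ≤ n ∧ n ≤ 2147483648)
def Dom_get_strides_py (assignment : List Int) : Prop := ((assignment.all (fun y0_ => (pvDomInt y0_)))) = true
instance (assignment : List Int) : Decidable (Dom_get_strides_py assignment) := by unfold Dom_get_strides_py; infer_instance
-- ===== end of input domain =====

-- B groups indices by group in one dict pass instead of rescanning the assignment per group (faster).


-- ===== PORT A =====
def get_strides_py (assignment : List Int) : List Int :=
  let strides : PySem.Set Int := PySem.Set.empty
  let groups : PySem.Set Int := PySem.Set.ofList assignment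
  groups.foldl
    (fun strides group =>
      let group_indices : List Int :=
        ((PySem.List.enumerate assignment).filter (fun p => p.2 == group)).map (fun p => p.1)
      if group_indices.length > 1 then
        let group_strides : List Int :=
          ((PySem.List.slice group_indices (some 1) none).zip
            (PySem.List.slice group_indices none (some (-1)))).map (fun q => q.1 - q.2)
        PySem.Set.update strides group_strides
      else strides)
    strides

-- ===== PORT B =====
def get_strides_py_alt (assignment : List Int) : List Int :=
  let indices : PySem.Dict Int (List Int) :=
    (PySem.List.enumerate assignment).foldl
      (fun d p => PySem.Dict.modify d p.2 [] (fun l => l ++ [p.1])) PySem.Dict.empty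
  (PySem.Dict.values indices).foldl
    (fun strides idx =>
      ((PySem.List.slice idx (some 1) none).zip
        (PySem.List.slice idx none (some (-1)))).foldl
        (fun s q => PySem.Set.add s (q.1 - q.2)) strides)
    PySem.Set.empty

-- ===== PRECONDITION & SPEC =====
def Spec_get_strides_py (assignment : List Int) (out : List Int) : Prop := out = get_strides_py_alt assignment
instance (assignment : List Int) (out : List Int) : Decidable (Spec_get_strides_py assignment out) := by unfold Spec_get_strides_py; infer_instance

-- ===== CLAIM (what is proved, stated in full; the proofs are below) =====
def Claim_equal_get_strides_py : Prop := ∀ (assignment : List Int), Dom_get_strides_py assignment → Spec_get_strides_py assignment (get_strides_py assignment)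

-- ===== LEMMAS AND PROOFS =====

-- The per-group index list A computes is exactly B's dict entry for that group.
theorem pv_getD_indices (assignment : List Int) (g : Int) :
    ((PySem.List.enumerate assignment).foldl
      (fun d p => PySem.Dict.modify d p.2 [] (fun l => l ++ [p.1]))
      (PySem.Dict.empty : PySem.Dict Int (List Int))).getD g []
    = ((PySem.List.enumerate assignment).filter (fun p => p.2 == g)).map (fun p => p.1) := by
  have h : (PySem.List.enumerate assignment).foldl
      (fun d p => PySem.Dict.modify d p.2 [] (fun l => l ++ [p.1]))
      (PySem.Dict.empty : PySem.Dict Int (List Int))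
    = ((PySem.List.enumerate assignment).map (fun p => (p.2, p.1))).foldl
        (fun d q => PySem.Dict.modify d q.1 [] (fun l => l ++ [q.2])) PySem.Dict.empty := by
    rw [List.foldl_map]
  rw [h, PySem.Dict.getD_foldl_modify_append, PySem.Dict.getD_empty]
  simp only [List.nil_append, List.filter_map, List.map_map, Function.comp_def]

-- If a list has at most one element, the zipped consecutive-pairs list is empty.
theorem pv_zip_short (l : List Int) (h : ¬ l.length > 1) :
    (PySem.List.slice l (some 1) none).zip (PySem.List.slice l none (some (-1))) = [] := by
  rw [PySem.List.slice_from_one]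
  match l, h with
  | [], _ => rfl
  | [x], _ => rfl
  | x :: y :: t, h => simp at h

theorem get_strides_py_eq (assignment : List Int) :
    get_strides_py assignment = get_strides_py_alt assignment := by
  unfold get_strides_py get_strides_py_alt
  simp only []
  set E := PySem.List.enumerate assignment with hE
  set d := E.foldl (fun d p => PySem.Dict.modify d p.2 [] (fun l => l ++ [p.1]))
      (PySem.Dict.empty : PySem.Dict Int (List Int)) with hd
  have hnodup : d.keys.Nodup := by
    rw [hd]
    exact PySem.Dict.nodup_keys_foldl_modify_key E (fun p => p.2) []
      (fun d p l => l ++ [p.1]) PySem.Dict.empty (by simp)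
  have hkeys : d.keys = PySem.Set.ofList assignment := by
    rw [hd, PySem.Dict.keys_foldl_modify_key]
    simp [PySem.Dict.keys_empty, PySem.Set.update_nil_left, hE, PySem.List.map_snd_enumerate]
  have hvals : d.values = d.keys.map (fun g => d.getD g []) :=
    PySem.Dict.values_eq_map_keys d hnodup []
  rw [hvals, hkeys, List.foldl_map]
  apply PySem.List.foldl_congr_mem'
  intro g _ s
  have hF : d.getD g [] = (E.filter (fun p => p.2 == g)).map (fun p => p.1) := by
    rw [hd, hE]; exact pv_getD_indices assignment g
  rw [hF]
  set F := (E.filter (fun p => p.2 == g)).map (fun p => p.1) with hFdef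
  by_cases h : F.length > 1
  · rw [if_pos h]
    rw [← PySem.Set.update_map_eq_foldl_add]
  · rw [if_neg h, pv_zip_short F h]
    simp

-- ===== VERDICT (by name: the statement is the Claim_ definition above) =====
theorem get_strides_py_spec : Claim_equal_get_strides_py := by
  intro assignment _
  unfold Spec_get_strides_py
  exact get_strides_py_eq assignment
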